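-- pv_equiv track=rewrite | github.com/openMSX/openMSX | src/video/scalers/hq_analyze.py | analyzeCaseFunction
-- ===== SOURCE A (Python) =====
-- from collections import defaultdict
--
-- def analyzeCaseFunction(caseToWeights):
-- 	weightsToCase = defaultdict(set)
-- 	for case, weights in enumerate(caseToWeights):
-- 		weightsToCase[weights].add(case)
-- 	for weights in sorted(weightsToCase.keys()):
-- 		cases = weightsToCase[weights]
-- 		partitions = {
-- 			tuple((case >> edgeNum) & 1 for edgeNum in range(11, -1, -1))
-- 			for case in cases
-- 			}
-- 		# Repeatedly merge partitions until we have a minimal set.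
-- 		for edgeNum in range(12):
-- 			changed = True
-- 			while changed:
-- 				changed = False
-- 				for part in list(partitions):
-- 					if part not in partitions:
-- 						continue
-- 					if part[edgeNum] < 2:
-- 						pre = part[ : edgeNum]
-- 						post = part[edgeNum + 1 : ]
-- 						dual = pre + (part[edgeNum] ^ 1,) + post
-- 						if dual in partitions:
-- 							partitions.remove(part)
-- 							partitions.remove(dual)
-- 							partitions.add(pre + (2,) + post)
-- 							changed = True
-- 		yield weights, [
-- 			''.join('01x'[bit] for bit in partition)
-- 			for partition in sorted(partitions)
-- 			]
-- ===== SOURCE B (Python) =====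
-- def analyzeCaseFunction(caseToWeights):
--     groups = {}
--     for case, weights in enumerate(caseToWeights):
--         groups.setdefault(weights, []).append(case)
--     for weights in sorted(groups):
--         parts = {tuple((case >> e) & 1 for e in range(11, -1, -1))
--                  for case in groups[weights]}
--         # One pass per edge: a 0/1 part whose dual is present maps to the
--         # merged part with 2 at that edge; both pair members map to the same
--         # merged part, so the set dedups them.  No rescanning needed.
--         for e in range(12):
--             new = set()
--             for p in parts:
--                 if p[e] < 2 and p[:e] + (p[e] ^ 1,) + p[e + 1:] in parts:
--                     new.add(p[:e] + (2,) + p[e + 1:])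
--                 else:
--                     new.add(p)
--             parts = new
--         yield weights, [''.join('01x'[b] for b in p) for p in sorted(parts)]
-- ===== Notes on version B (the rewrite author's own statement) =====
-- stated objective: simpler
-- what changed: B replaces A's per-edge repeat-until-stable rescan with in-place removals by a single pass per edge that builds a fresh set, mapping each 0/1 part whose dual is present to the merged part (both pair members map to the same merged part, so the set dedups); one pass per edge provably reaches A's fixpoint.
import Mathlib
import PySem

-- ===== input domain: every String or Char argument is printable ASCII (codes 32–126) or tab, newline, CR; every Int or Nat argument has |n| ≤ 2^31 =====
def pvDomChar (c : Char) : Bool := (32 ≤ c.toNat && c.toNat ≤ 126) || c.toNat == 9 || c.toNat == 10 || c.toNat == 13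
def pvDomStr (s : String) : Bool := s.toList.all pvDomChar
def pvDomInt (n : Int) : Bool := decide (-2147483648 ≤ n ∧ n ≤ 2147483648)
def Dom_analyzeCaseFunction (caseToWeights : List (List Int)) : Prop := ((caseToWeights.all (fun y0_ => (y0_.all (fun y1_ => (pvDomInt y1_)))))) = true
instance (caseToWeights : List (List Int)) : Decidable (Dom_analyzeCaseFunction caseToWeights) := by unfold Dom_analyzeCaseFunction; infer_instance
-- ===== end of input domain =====

-- B replaces A's per-edge repeat-until-stable merge loop (with in-place removals)
-- by a single pass per edge that builds a fresh set; objective: simpler (same cost).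

-- ===== PORT A =====

-- tuple((case >> edgeNum) & 1 for edgeNum in range(11, -1, -1)); the shift amount is
-- an element of range(11,-1,-1), hence nonnegative, so `.toNat` is exact here.
def pvBits (case : Int) : List Int :=
  (PySem.List.pyRange 11 (-1) (-1)).map (fun e => PySem.Int.band (case >>> e.toNat) 1)

-- ''.join('01x'[bit] for bit in partition); bits are always 0, 1 or 2, so the
-- string index '01x'[bit] never raises (the `none` arm is unreachable).
def pvRender (partition : List Int) : String :=
  String.ofList (partition.foldl
    (fun acc b => acc ++ (match PySem.List.pyGet? ['0', '1', 'x'] b with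
                          | some c => [c]
                          | none => [])) [])

-- body of A's `for part in list(partitions)` loop; state = (partitions, changed).
-- `partitions.remove(part)` / `.remove(dual)` are ported as `discard`: both elements
-- were just checked to be members, so Python's KeyError cannot occur.
def pvStepA (edgeNum : Int) (st : PySem.Set (List Int) × Bool) (part : List Int) :
    PySem.Set (List Int) × Bool :=
  if PySem.Set.contains st.1 part then
    match PySem.List.pyGet? part edgeNum with
    | none => st   -- IndexError: unreachable, every partition has length 12 and 0 ≤ edgeNum < 12
    | some v =>
      if v < 2 then
        let pre := PySem.List.slice part none (some edgeNum)
        let post := PySem.List.slice part (some (edgeNum + 1)) none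
        let dual := pre ++ [PySem.Int.bxor v 1] ++ post
        if PySem.Set.contains st.1 dual then
          (PySem.Set.add (PySem.Set.discard (PySem.Set.discard st.1 part) dual) (pre ++ [2] ++ post), true)
        else st
      else st
  else st

-- `changed = True; while changed: changed = False; for part in list(partitions): …`
-- The fuel is a totality guard only: each merge shrinks the set by one, so
-- |partitions| + 1 iterations are enough for Python's loop to exit (the proof
-- below shows it in fact stabilises after one merging pass).
def pvWhileA (edgeNum : Int) : Nat → PySem.Set (List Int) → PySem.Set (List Int)
  | 0, parts => parts
  | fuel + 1, parts =>
    let r := parts.foldl (pvStepA edgeNum) (parts, false)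
    if r.2 then pvWhileA edgeNum fuel r.1 else r.1

def analyzeCaseFunction (caseToWeights : List (List Int)) : List (List Int × List String) :=
  let weightsToCase : PySem.Dict (List Int) (PySem.Set Int) :=
    (PySem.List.enumerate caseToWeights).foldl
      (fun d cw => PySem.Dict.modify d cw.2 PySem.Set.empty (fun s => PySem.Set.add s cw.1)) PySem.Dict.empty
  (PySem.List.sorted (PySem.Dict.keys weightsToCase) (fun w => w)).foldl
    (fun out weights =>
      let cases := PySem.Dict.getD weightsToCase weights PySem.Set.empty
      let partitions : PySem.Set (List Int) := PySem.Set.ofList (cases.map pvBits)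
      let partitions := (PySem.List.pyRange 0 12).foldl
        (fun parts e => pvWhileA e (parts.length + 1) parts) partitions
      out ++ [(weights, (PySem.List.sorted partitions (fun p => p)).map pvRender)]) []

-- ===== PORT B =====

-- B's single pass per edge: every part maps to its merged form if its dual is
-- present, else to itself; the fresh set dedups the two members of a merged pair.
def pvPassB (edgeNum : Int) (parts : PySem.Set (List Int)) : PySem.Set (List Int) :=
  parts.foldl
    (fun nw p =>
      match PySem.List.pyGet? p edgeNum with
      | none => PySem.Set.add nw p   -- IndexError: unreachable, parts have length 12
      | some v =>
        if v < 2 then   -- `p[e] < 2 and dual in parts` (short-circuit `and`)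
          if PySem.Set.contains parts
              (PySem.List.slice p none (some edgeNum) ++ [PySem.Int.bxor v 1] ++
               PySem.List.slice p (some (edgeNum + 1)) none) then
            PySem.Set.add nw
              (PySem.List.slice p none (some edgeNum) ++ [2] ++
               PySem.List.slice p (some (edgeNum + 1)) none)
          else PySem.Set.add nw p
        else PySem.Set.add nw p)
    PySem.Set.empty

def analyzeCaseFunction_alt (caseToWeights : List (List Int)) : List (List Int × List String) :=
  let groups : PySem.Dict (List Int) (List Int) :=
    (PySem.List.enumerate caseToWeights).foldl
      (fun d cw => PySem.Dict.modify d cw.2 [] (fun l => l ++ [cw.1])) PySem.Dict.empty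
  (PySem.List.sorted (PySem.Dict.keys groups) (fun w => w)).foldl
    (fun out weights =>
      let parts0 : PySem.Set (List Int) :=
        PySem.Set.ofList ((PySem.Dict.getD groups weights []).map pvBits)
      let parts := (PySem.List.pyRange 0 12).foldl (fun ps e => pvPassB e ps) parts0
      out ++ [(weights, (PySem.List.sorted parts (fun p => p)).map pvRender)]) []

-- ===== PRECONDITION & SPEC =====
def Spec_analyzeCaseFunction (caseToWeights : List (List Int)) (out : List (List Int × List String)) : Prop := out = analyzeCaseFunction_alt caseToWeights
instance (caseToWeights : List (List Int)) (out : List (List Int × List String)) : Decidable (Spec_analyzeCaseFunction caseToWeights out) := by unfold Spec_analyzeCaseFunction; infer_instance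

-- ===== CLAIM (what is proved, stated in full; the proofs are below) =====
def Claim_equal_analyzeCaseFunction : Prop := ∀ (caseToWeights : List (List Int)), Dom_analyzeCaseFunction caseToWeights → Spec_analyzeCaseFunction caseToWeights (analyzeCaseFunction caseToWeights)

-- ===== LEMMAS AND PROOFS =====

-- `dual` / merged part of `part` at edge e, as A and B build them.
def pvDual (e : Int) (p : List Int) : List Int :=
  PySem.List.slice p none (some e) ++ [PySem.Int.bxor ((PySem.List.pyGet? p e).getD 0) 1] ++
    PySem.List.slice p (some (e + 1)) none

def pvMrg (e : Int) (p : List Int) : List Int :=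
  PySem.List.slice p none (some e) ++ [2] ++ PySem.List.slice p (some (e + 1)) none

-- "p is mergeable at edge e with respect to set S"
def pvM (S : List (List Int)) (e : Int) (p : List Int) : Prop :=
  (PySem.List.pyGet? p e).getD 2 < 2 ∧ pvDual e p ∈ S

-- invariant on the partition sets: distinct elements, each of length 12 with entries in {0,1,2}
def pvGood (S : List (List Int)) : Prop :=
  S.Nodup ∧ ∀ p ∈ S, p.length = 12 ∧ ∀ b ∈ p, b = 0 ∨ b = 1 ∨ b = 2


lemma pvGet_eq (p : List Int) (e : Int) (he : 0 ≤ e) (hlt : e < (p.length : Int)) :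
    PySem.List.pyGet? p e = some (p.getD e.toNat 0) := by
  have hn : e.toNat < p.length := by omega
  simp only [PySem.List.pyGet?, PySem.List.pyIdx?, he, hlt, if_pos]
  simp [List.getElem?_eq_getElem hn]

lemma pvDual_eq (p : List Int) (e : Int) (he : 0 ≤ e) (hlt : e < (p.length : Int)) :
    pvDual e p = p.set e.toNat (PySem.Int.bxor (p.getD e.toNat 0) 1) := by
  have hn : e.toNat < p.length := by omega
  have h1 : (e + 1).toNat = e.toNat + 1 := by omega
  rw [pvDual, pvGet_eq p e he hlt, PySem.List.slice_to p he,
    PySem.List.slice_from p (by omega : (0:Int) ≤ e + 1), h1,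
    List.set_eq_take_cons_drop _ hn]
  simp

lemma pvMrg_eq (p : List Int) (e : Int) (he : 0 ≤ e) (hlt : e < (p.length : Int)) :
    pvMrg e p = p.set e.toNat 2 := by
  have hn : e.toNat < p.length := by omega
  have h1 : (e + 1).toNat = e.toNat + 1 := by omega
  rw [pvMrg, PySem.List.slice_to p he,
    PySem.List.slice_from p (by omega : (0:Int) ≤ e + 1), h1,
    List.set_eq_take_cons_drop _ hn]
  simp

lemma pvDual_len (p : List Int) (e : Int) (he : 0 ≤ e) (hlt : e < (p.length : Int)) :
    (pvDual e p).length = p.length := by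
  rw [pvDual_eq p e he hlt]; exact List.length_set

lemma pvMrg_len (p : List Int) (e : Int) (he : 0 ≤ e) (hlt : e < (p.length : Int)) :
    (pvMrg e p).length = p.length := by
  rw [pvMrg_eq p e he hlt]; exact List.length_set

lemma pvDual_getD (p : List Int) (e : Int) (he : 0 ≤ e) (hlt : e < (p.length : Int)) :
    (pvDual e p).getD e.toNat 0 = PySem.Int.bxor (p.getD e.toNat 0) 1 := by
  have hn : e.toNat < (pvDual e p).length := by rw [pvDual_len p e he hlt]; omega
  rw [List.getD_eq_getElem _ 0 hn]
  simp [pvDual_eq p e he hlt]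

lemma pvMrg_getD (p : List Int) (e : Int) (he : 0 ≤ e) (hlt : e < (p.length : Int)) :
    (pvMrg e p).getD e.toNat 0 = 2 := by
  have hn : e.toNat < (pvMrg e p).length := by rw [pvMrg_len p e he hlt]; omega
  rw [List.getD_eq_getElem _ 0 hn]
  simp [pvMrg_eq p e he hlt]

lemma pvXor_cases (v : Int) (h : v = 0 ∨ v = 1) :
    (v = 0 ∧ PySem.Int.bxor v 1 = 1) ∨ (v = 1 ∧ PySem.Int.bxor v 1 = 0) := by
  rcases h with h | h <;> subst h
  · exact Or.inl ⟨rfl, by decide⟩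
  · exact Or.inr ⟨rfl, by decide⟩

lemma pvDual_invol (p : List Int) (e : Int) (he : 0 ≤ e) (hlt : e < (p.length : Int))
    (h01 : p.getD e.toNat 0 = 0 ∨ p.getD e.toNat 0 = 1) :
    pvDual e (pvDual e p) = p := by
  have hn : e.toNat < p.length := by omega
  have hlen : e < ((pvDual e p).length : Int) := by rw [pvDual_len p e he hlt]; omega
  rw [pvDual_eq _ e he hlen, pvDual_getD p e he hlt, pvDual_eq p e he hlt, List.set_set]
  have hx : PySem.Int.bxor (PySem.Int.bxor (p.getD e.toNat 0) 1) 1 = p.getD e.toNat 0 := by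
    rcases pvXor_cases _ h01 with ⟨h0, hb⟩ | ⟨h0, hb⟩ <;> rw [hb, h0] <;> decide
  rw [hx, List.getD_eq_getElem p 0 hn, List.set_getElem_self]

lemma pvMrg_dual (p : List Int) (e : Int) (he : 0 ≤ e) (hlt : e < (p.length : Int)) :
    pvMrg e (pvDual e p) = pvMrg e p := by
  have hlen : e < ((pvDual e p).length : Int) := by rw [pvDual_len p e he hlt]; omega
  rw [pvMrg_eq _ e he hlen, pvMrg_eq p e he hlt, pvDual_eq p e he hlt, List.set_set]

-- entries of a member of a pvGood set
lemma pvEnt_getD (p : List Int) (n : Nat) (hn : n < p.length)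
    (hent : ∀ b ∈ p, b = 0 ∨ b = 1 ∨ b = 2) :
    p.getD n 0 = 0 ∨ p.getD n 0 = 1 ∨ p.getD n 0 = 2 := by
  rw [List.getD_eq_getElem p 0 hn]; exact hent _ (List.getElem_mem hn)

lemma pvM_congr (S T : List (List Int)) (e : Int) (p : List Int)
    (h : ∀ x, x ∈ S ↔ x ∈ T) : pvM S e p ↔ pvM T e p := by
  unfold pvM; rw [h]

-- ===== characterisation of one pass of A's inner loop =====

lemma pvM_facts (S : List (List Int)) (e : Int) (he : 0 ≤ e) (he' : e < 12)
    (hG : pvGood S) (x : List Int) (hxS : x ∈ S) (hm : pvM S e x) :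
    x.getD e.toNat 0 < 2 ∧ pvDual e (pvDual e x) = x ∧ pvM S e (pvDual e x) ∧
      pvMrg e (pvDual e x) = pvMrg e x := by
  obtain ⟨hx12, hxent⟩ := hG.2 x hxS
  have hxlt : e < (x.length : Int) := by omega
  have h1 : x.getD e.toNat 0 < 2 := by
    have := hm.1
    rwa [pvGet_eq x e he hxlt, Option.getD_some] at this
  have h01 : x.getD e.toNat 0 = 0 ∨ x.getD e.toNat 0 = 1 := by
    rcases pvEnt_getD x e.toNat (by omega) hxent with h | h | h <;> omega
  have hinv := pvDual_invol x e he hxlt h01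
  have hdlt : e < ((pvDual e x).length : Int) := by rw [pvDual_len x e he hxlt]; omega
  have h2 : pvM S e (pvDual e x) := by
    refine ⟨?_, by rw [hinv]; exact hxS⟩
    rw [pvGet_eq _ e he hdlt, Option.getD_some, pvDual_getD x e he hxlt]
    rcases pvXor_cases _ h01 with ⟨_, hb⟩ | ⟨_, hb⟩ <;> rw [hb] <;> omega
  exact ⟨h1, hinv, h2, pvMrg_dual x e he hxlt⟩

lemma pvNe_mrg_of_lt (e : Int) (he : 0 ≤ e) (x q : List Int) (hq : e < (q.length : Int))
    (hxlt : x.getD e.toNat 0 < 2) : x ≠ pvMrg e q := by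
  intro h
  rw [h, pvMrg_getD q e he hq] at hxlt
  omega

set_option maxHeartbeats 1000000 in
lemma pvStepA_preserve (e : Int) (he : 0 ≤ e) (he' : e < 12) (S : List (List Int))
    (hG : pvGood S) (done rest : List (List Int)) (p : List Int)
    (C : PySem.Set (List Int)) (ch : Bool)
    (hsplit : S = done ++ p :: rest)
    (hC : ∀ x, x ∈ C ↔ ((x ∈ S ∧ ¬ pvM S e x) ∨
        (x ∈ S ∧ pvM S e x ∧ x ∉ done ∧ pvDual e x ∉ done) ∨
        (∃ q ∈ done, pvM S e q ∧ x = pvMrg e q))) (hN : C.Nodup)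
    (hch : ch = true ↔ ∃ q ∈ done, pvM S e q) :
    (∀ x, x ∈ (pvStepA e (C, ch) p).1 ↔ ((x ∈ S ∧ ¬ pvM S e x) ∨
        (x ∈ S ∧ pvM S e x ∧ x ∉ done ++ [p] ∧ pvDual e x ∉ done ++ [p]) ∨
        (∃ q ∈ done ++ [p], pvM S e q ∧ x = pvMrg e q))) ∧
    (pvStepA e (C, ch) p).1.Nodup ∧
    ((pvStepA e (C, ch) p).2 = true ↔ ∃ q ∈ done ++ [p], pvM S e q) := by
  have hpS : p ∈ S := by rw [hsplit]; exact List.mem_append.mpr (Or.inr List.mem_cons_self)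
  have hdoneS : ∀ q ∈ done, q ∈ S := fun q hq => by
    rw [hsplit]; exact List.mem_append.mpr (Or.inl hq)
  obtain ⟨hp12, hpent⟩ := hG.2 p hpS
  have hplt : e < (p.length : Int) := by omega
  have hv := pvGet_eq p e he hplt
  have hpdone : p ∉ done := by
    have h2 := hG.1
    rw [hsplit] at h2
    exact fun hmem => (List.nodup_append.mp h2).2.2 p hmem p List.mem_cons_self rfl
  have hvcase := pvEnt_getD p e.toNat (by omega) hpent
  have hlen12 : ∀ q ∈ S, e < (q.length : Int) := fun q hq => by
    have := (hG.2 q hq).1; omega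
  -- x = pvMrg e q (q ∈ S) has entry 2 at e, while a mergeable x has entry < 2
  have hMneMrg : ∀ x, pvM S e x → x ∈ S → ∀ q ∈ S, x ≠ pvMrg e q := by
    intro x hm hxS q hq
    exact pvNe_mrg_of_lt e he x q (hlen12 q hq)
      (pvM_facts S e he he' hG x hxS hm).1
  -- if pvDual e x = y for a mergeable x ∈ S then x = pvDual e y
  have hDinv : ∀ x, x ∈ S → pvM S e x → ∀ y, pvDual e x = y → x = pvDual e y := by
    intro x hxS hm y hxy
    have := (pvM_facts S e he he' hG x hxS hm).2.1
    rw [← this, hxy]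
  by_cases hv2 : p.getD e.toNat 0 < 2
  · have hp01 : p.getD e.toNat 0 = 0 ∨ p.getD e.toNat 0 = 1 := by
      rcases hvcase with h | h | h <;> omega
    have hde : pvDual e p = PySem.List.slice p none (some e) ++
        [PySem.Int.bxor (p.getD e.toNat 0) 1] ++ PySem.List.slice p (some (e + 1)) none := by
      simp [pvDual, hv]
    by_cases hdS : pvDual e p ∈ S
    · have hm : pvM S e p := ⟨by rw [hv]; simpa using hv2, hdS⟩
      obtain ⟨-, hinv, hmD, hmrgD⟩ := pvM_facts S e he he' hG p hpS hm
      by_cases hddone : pvDual e p ∈ done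
      -- CASE C: the pair of p was already merged (via its dual); the step is a no-op
      · have hchT : ch = true := hch.mpr ⟨pvDual e p, hddone, hmD⟩
        have hnotC : p ∉ C := by
          intro hc
          rcases (hC p).mp hc with
            ⟨-, hnm⟩ | ⟨-, -, -, hdd⟩ | ⟨q, hq, -, hpq⟩
          · exact hnm hm
          · exact hdd hddone
          · exact hMneMrg p hm hpS q (hdoneS q hq) hpq
        have hcontF : ¬ (PySem.Set.contains C p = true) :=
          fun h => hnotC ((PySem.Set.contains_iff C p).mp h)
        have hstep : pvStepA e (C, ch) p = (C, ch) := by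
          unfold pvStepA
          rw [if_neg hcontF]
        rw [hstep]
        refine ⟨fun x => ?_, hN, ?_⟩
        · rw [hC x]
          constructor
          · rintro (h | ⟨hxS, hMx, hxd, hxdd⟩ | ⟨q, hq, hMq, hxq⟩)
            · exact Or.inl h
            · refine Or.inr (Or.inl ⟨hxS, hMx, ?_, ?_⟩)
              · simp only [List.mem_append, List.mem_singleton]
                rintro (h | rfl)
                · exact hxd h
                · exact hxdd hddone
              · simp only [List.mem_append, List.mem_singleton]
                rintro (h | h)
                · exact hxdd h
                · exact hxd (by rw [hDinv x hxS hMx p h]; exact hddone)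
            · exact Or.inr (Or.inr ⟨q, List.mem_append.mpr (Or.inl hq), hMq, hxq⟩)
          · rintro (h | ⟨hxS, hMx, hxd, hxdd⟩ | ⟨q, hq, hMq, hxq⟩)
            · exact Or.inl h
            · refine Or.inr (Or.inl ⟨hxS, hMx, ?_, ?_⟩)
              · exact fun h => hxd (List.mem_append.mpr (Or.inl h))
              · exact fun h => hxdd (List.mem_append.mpr (Or.inl h))
            · rcases List.mem_append.mp hq with hq | hq
              · exact Or.inr (Or.inr ⟨q, hq, hMq, hxq⟩)
              · -- q = p: x = pvMrg e p = pvMrg e (pvDual e p), already produced by the dual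
                have hqp : q = p := by simpa using hq
                exact Or.inr (Or.inr ⟨pvDual e p, hddone, hmD, by rw [hxq, hqp, hmrgD]⟩)
        · rw [hchT]
          simp only [true_iff]
          exact ⟨p, List.mem_append.mpr (Or.inr (by simp)), hm⟩
      -- CASE D: the pair {p, dual p} is merged now
      · have hpC : p ∈ C := (hC p).mpr (Or.inr (Or.inl ⟨hpS, hm, hpdone, hddone⟩))
        have hdpdone : pvDual e (pvDual e p) ∉ done := by rw [hinv]; exact hpdone
        have hdC : pvDual e p ∈ C :=
          (hC _).mpr (Or.inr (Or.inl ⟨hdS, hmD, hddone, hdpdone⟩))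
        have hcont : PySem.Set.contains C p = true := (PySem.Set.contains_iff C p).mpr hpC
        have hdcont : PySem.Set.contains C (PySem.List.slice p none (some e) ++
            [PySem.Int.bxor (p.getD e.toNat 0) 1] ++
            PySem.List.slice p (some (e + 1)) none) = true := by
          rw [PySem.Set.contains_iff, ← hde]
          exact hdC
        have hstep : pvStepA e (C, ch) p =
            (PySem.Set.add (PySem.Set.discard (PySem.Set.discard C p) (pvDual e p))
              (pvMrg e p), true) := by
          unfold pvStepA
          simp only [hv]
          rw [if_pos hcont, if_pos hv2, if_pos hdcont, ← hde]
          rfl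
        rw [hstep]
        refine ⟨fun x => ?_, ?_, ?_⟩
        · have hmem : x ∈ (PySem.Set.add
              (PySem.Set.discard (PySem.Set.discard C p) (pvDual e p)) (pvMrg e p)) ↔
              ((x ∈ C ∧ x ≠ p) ∧ x ≠ pvDual e p) ∨ x = pvMrg e p := by
            rw [PySem.Set.mem_add, PySem.Set.mem_discard, PySem.Set.mem_discard]
          rw [hmem]
          constructor
          · rintro (⟨⟨hxC, hxp⟩, hxdp⟩ | hx)
            · rcases (hC x).mp hxC with h | ⟨hxS, hMx, hxd, hxdd⟩ | ⟨q, hq, hMq, hxq⟩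
              · exact Or.inl h
              · refine Or.inr (Or.inl ⟨hxS, hMx, ?_, ?_⟩)
                · simp only [List.mem_append, List.mem_singleton]
                  rintro (h | rfl)
                  · exact hxd h
                  · exact hxp rfl
                · simp only [List.mem_append, List.mem_singleton]
                  rintro (h | h)
                  · exact hxdd h
                  · exact hxdp (hDinv x hxS hMx p h)
              · exact Or.inr (Or.inr ⟨q, List.mem_append.mpr (Or.inl hq), hMq, hxq⟩)
            · exact Or.inr (Or.inr ⟨p, List.mem_append.mpr (Or.inr (by simp)), hm, hx⟩)
          · rintro (⟨hxS, hnM⟩ | ⟨hxS, hMx, hxd, hxdd⟩ | ⟨q, hq, hMq, hxq⟩)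
            · refine Or.inl ⟨⟨(hC x).mpr (Or.inl ⟨hxS, hnM⟩), ?_⟩, ?_⟩
              · rintro rfl; exact hnM hm
              · rintro rfl; exact hnM hmD
            · have hxp : x ≠ p := by
                rintro rfl
                exact hxd (List.mem_append.mpr (Or.inr (by simp)))
              have hxdp : x ≠ pvDual e p := by
                rintro rfl
                exact hxdd (by rw [hinv]; exact List.mem_append.mpr (Or.inr (by simp)))
              refine Or.inl ⟨⟨(hC x).mpr (Or.inr (Or.inl ⟨hxS, hMx,
                fun h => hxd (List.mem_append.mpr (Or.inl h)),
                fun h => hxdd (List.mem_append.mpr (Or.inl h))⟩)), hxp⟩, hxdp⟩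
            · rcases List.mem_append.mp hq with hq | hq
              · have hqS := hdoneS q hq
                refine Or.inl ⟨⟨(hC x).mpr (Or.inr (Or.inr ⟨q, hq, hMq, hxq⟩)), ?_⟩, ?_⟩
                · intro hxp2
                  exact hMneMrg p hm hpS q hqS (hxp2 ▸ hxq)
                · intro hxd2
                  exact hMneMrg (pvDual e p) hmD hdS q hqS (hxd2 ▸ hxq)
              · have hqp : q = p := by simpa using hq
                exact Or.inr (hqp ▸ hxq)
        · exact PySem.Set.nodup_add _ _
            (PySem.Set.nodup_discard _ _ (PySem.Set.nodup_discard _ _ hN))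
        · simp only [true_iff]
          exact ⟨p, List.mem_append.mpr (Or.inr (by simp)), hm⟩
    -- CASE B: p has a 0/1 entry at e but no dual in S: no merge
    · have hnm : ¬ pvM S e p := fun h => hdS h.2
      have hpC : p ∈ C := (hC p).mpr (Or.inl ⟨hpS, hnm⟩)
      have hdnot : pvDual e p ∉ C := by
        intro hdC
        rcases (hC _).mp hdC with ⟨h, -⟩ | ⟨h, -⟩ | ⟨q, hq, -, hdq⟩
        · exact hdS h
        · exact hdS h
        · have hdlt : (pvDual e p).getD e.toNat 0 = PySem.Int.bxor (p.getD e.toNat 0) 1 :=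
            pvDual_getD p e he hplt
          refine pvNe_mrg_of_lt e he (pvDual e p) q (hlen12 q (hdoneS q hq)) ?_ hdq
          rw [hdlt]
          rcases pvXor_cases _ hp01 with ⟨_, hb⟩ | ⟨_, hb⟩ <;> rw [hb] <;> omega
      have hdcont : ¬ (PySem.Set.contains C (PySem.List.slice p none (some e) ++
          [PySem.Int.bxor (p.getD e.toNat 0) 1] ++
          PySem.List.slice p (some (e + 1)) none) = true) := by
        rw [PySem.Set.contains_iff, ← hde]
        exact hdnot
      have hcont : PySem.Set.contains C p = true := (PySem.Set.contains_iff C p).mpr hpC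
      have hstep : pvStepA e (C, ch) p = (C, ch) := by
        unfold pvStepA
        simp only [hv]
        rw [if_pos hcont, if_pos hv2, if_neg hdcont]
      rw [hstep]
      refine ⟨fun x => ?_, hN, ?_⟩
      · rw [hC x]
        constructor
        · rintro (h | ⟨hxS, hMx, hxd, hxdd⟩ | ⟨q, hq, hMq, hxq⟩)
          · exact Or.inl h
          · refine Or.inr (Or.inl ⟨hxS, hMx, ?_, ?_⟩)
            · simp only [List.mem_append, List.mem_singleton]
              rintro (h | rfl)
              · exact hxd h
              · exact hdS hMx.2
            · simp only [List.mem_append, List.mem_singleton]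
              rintro (h | h)
              · exact hxdd h
              · exact hdS (by rw [← hDinv x hxS hMx p h]; exact hxS)
          · exact Or.inr (Or.inr ⟨q, List.mem_append.mpr (Or.inl hq), hMq, hxq⟩)
        · rintro (h | ⟨hxS, hMx, hxd, hxdd⟩ | ⟨q, hq, hMq, hxq⟩)
          · exact Or.inl h
          · exact Or.inr (Or.inl ⟨hxS, hMx,
              fun h => hxd (List.mem_append.mpr (Or.inl h)),
              fun h => hxdd (List.mem_append.mpr (Or.inl h))⟩)
          · rcases List.mem_append.mp hq with hq | hq
            · exact Or.inr (Or.inr ⟨q, hq, hMq, hxq⟩)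
            · have hqp : q = p := by simpa using hq
              exact absurd hMq (by rw [hqp]; exact hnm)
      · rw [hch]
        constructor
        · rintro ⟨q, hq, hMq⟩
          exact ⟨q, List.mem_append.mpr (Or.inl hq), hMq⟩
        · rintro ⟨q, hq, hMq⟩
          rcases List.mem_append.mp hq with hq | hq
          · exact ⟨q, hq, hMq⟩
          · have hqp : q = p := by simpa using hq
            exact absurd hMq (hqp ▸ hnm)
  -- CASE A: p has entry 2 at e: no merge possible at this edge
  · have hnm : ¬ pvM S e p := by
      intro h
      have := h.1
      rw [hv, Option.getD_some] at this
      exact hv2 this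
    have hpC : p ∈ C := (hC p).mpr (Or.inl ⟨hpS, hnm⟩)
    have hcont : PySem.Set.contains C p = true := (PySem.Set.contains_iff C p).mpr hpC
    have hstep : pvStepA e (C, ch) p = (C, ch) := by
      unfold pvStepA
      simp only [hv]
      rw [if_pos hcont, if_neg hv2]
    rw [hstep]
    refine ⟨fun x => ?_, hN, ?_⟩
    · rw [hC x]
      constructor
      · rintro (h | ⟨hxS, hMx, hxd, hxdd⟩ | ⟨q, hq, hMq, hxq⟩)
        · exact Or.inl h
        · refine Or.inr (Or.inl ⟨hxS, hMx, ?_, ?_⟩)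
          · simp only [List.mem_append, List.mem_singleton]
            rintro (h | rfl)
            · exact hxd h
            · exact hnm hMx
          · simp only [List.mem_append, List.mem_singleton]
            rintro (h | h)
            · exact hxdd h
            · -- pvDual e x = p: but the dual of a mergeable x has entry < 2 at e
              have hmDx := (pvM_facts S e he he' hG x hxS hMx).2.2.1
              have hlt := (pvM_facts S e he he' hG (pvDual e x) hMx.2 hmDx).1
              rw [h] at hlt
              exact hv2 hlt
        · exact Or.inr (Or.inr ⟨q, List.mem_append.mpr (Or.inl hq), hMq, hxq⟩)
      · rintro (h | ⟨hxS, hMx, hxd, hxdd⟩ | ⟨q, hq, hMq, hxq⟩)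
        · exact Or.inl h
        · exact Or.inr (Or.inl ⟨hxS, hMx,
            fun h => hxd (List.mem_append.mpr (Or.inl h)),
            fun h => hxdd (List.mem_append.mpr (Or.inl h))⟩)
        · rcases List.mem_append.mp hq with hq | hq
          · exact Or.inr (Or.inr ⟨q, hq, hMq, hxq⟩)
          · have hqp : q = p := by simpa using hq
            exact absurd hMq (by rw [hqp]; exact hnm)
    · rw [hch]
      constructor
      · rintro ⟨q, hq, hMq⟩
        exact ⟨q, List.mem_append.mpr (Or.inl hq), hMq⟩
      · rintro ⟨q, hq, hMq⟩
        rcases List.mem_append.mp hq with hq | hq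
        · exact ⟨q, hq, hMq⟩
        · have hqp : q = p := by simpa using hq
          exact absurd hMq (by rw [hqp]; exact hnm)

lemma pvPassA_go (e : Int) (he : 0 ≤ e) (he' : e < 12) (S : List (List Int))
    (hG : pvGood S) :
    ∀ (todo done : List (List Int)) (C : PySem.Set (List Int)) (ch : Bool),
      S = done ++ todo →
      (∀ x, x ∈ C ↔ ((x ∈ S ∧ ¬ pvM S e x) ∨
        (x ∈ S ∧ pvM S e x ∧ x ∉ done ∧ pvDual e x ∉ done) ∨
        (∃ q ∈ done, pvM S e q ∧ x = pvMrg e q))) →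
      C.Nodup →
      (ch = true ↔ ∃ q ∈ done, pvM S e q) →
      (∀ x, x ∈ (todo.foldl (pvStepA e) (C, ch)).1 ↔
         ((x ∈ S ∧ ¬ pvM S e x) ∨ (∃ q ∈ S, pvM S e q ∧ x = pvMrg e q))) ∧
      (todo.foldl (pvStepA e) (C, ch)).1.Nodup ∧
      ((todo.foldl (pvStepA e) (C, ch)).2 = true ↔ ∃ q ∈ S, pvM S e q) := by
  intro todo
  induction todo with
  | nil =>
    intro done C ch hsplit hC hN hch
    simp only [List.foldl_nil]
    rw [List.append_nil] at hsplit
    subst hsplit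
    refine ⟨fun x => ?_, hN, hch⟩
    rw [hC x]
    constructor
    · rintro (h | ⟨hxS, _, hx, _⟩ | ⟨q, hq, hm, hx⟩)
      · exact Or.inl h
      · exact absurd hxS hx
      · exact Or.inr ⟨q, hq, hm, hx⟩
    · rintro (h | ⟨q, hq, hm, hx⟩)
      · exact Or.inl h
      · exact Or.inr (Or.inr ⟨q, hq, hm, hx⟩)
  | cons p rest ih =>
    intro done C ch hsplit hC hN hch
    simp only [List.foldl_cons]
    obtain ⟨h1, h2, h3⟩ := pvStepA_preserve e he he' S hG done rest p C ch hsplit hC hN hch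
    have := ih (done ++ [p]) (pvStepA e (C, ch) p).1 (pvStepA e (C, ch) p).2
      (by rw [hsplit]; simp) h1 h2 h3
    simpa using this

lemma pvPassA_char (e : Int) (he : 0 ≤ e) (he' : e < 12) (S : List (List Int))
    (hG : pvGood S) :
    (∀ x, x ∈ (S.foldl (pvStepA e) (S, false)).1 ↔
       ((x ∈ S ∧ ¬ pvM S e x) ∨ (∃ q ∈ S, pvM S e q ∧ x = pvMrg e q))) ∧
    (S.foldl (pvStepA e) (S, false)).1.Nodup ∧
    ((S.foldl (pvStepA e) (S, false)).2 = true ↔ ∃ q ∈ S, pvM S e q) := by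
  refine pvPassA_go e he he' S hG S [] S false (by simp) (fun x => ?_) hG.1 (by simp)
  simp only [false_and, exists_false, or_false, List.not_mem_nil,
    not_false_iff, and_true]
  by_cases hm : pvM S e x <;> tauto

-- the result of a pass is pvGood again
lemma pvGood_of_char (e : Int) (he : 0 ≤ e) (he' : e < 12) (S R : List (List Int))
    (hG : pvGood S)
    (hchar : ∀ x, x ∈ R ↔ ((x ∈ S ∧ ¬ pvM S e x) ∨ (∃ q ∈ S, pvM S e q ∧ x = pvMrg e q)))
    (hnd : R.Nodup) : pvGood R := by
  refine ⟨hnd, fun x hx => ?_⟩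
  rcases (hchar x).mp hx with ⟨hxS, _⟩ | ⟨q, hqS, _, hxq⟩
  · exact hG.2 x hxS
  · obtain ⟨hq12, hqent⟩ := hG.2 q hqS
    have hlt : e < (q.length : Int) := by omega
    subst hxq
    constructor
    · rw [pvMrg_len q e he hlt, hq12]
    · intro b hb
      rw [pvMrg_eq q e he hlt] at hb
      rcases List.mem_or_eq_of_mem_set hb with hb | hb
      · exact hqent b hb
      · right; right; exact hb

-- after one pass nothing is mergeable any more
lemma pvNoPair_of_char (e : Int) (he : 0 ≤ e) (he' : e < 12) (S R : List (List Int))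
    (hG : pvGood S)
    (hchar : ∀ x, x ∈ R ↔ ((x ∈ S ∧ ¬ pvM S e x) ∨ (∃ q ∈ S, pvM S e q ∧ x = pvMrg e q))) :
    ∀ x ∈ R, ¬ pvM R e x := by
  intro x hxR ⟨hxlt, hxd⟩
  -- x has an in-range entry < 2 at e, so x is not a merged part: x ∈ S ∧ ¬ pvM S e x
  have hx : x ∈ S ∧ ¬ pvM S e x := by
    rcases (hchar x).mp hxR with h | ⟨q, hqS, _, hxq⟩
    · exact h
    · exfalso
      obtain ⟨hq12, _⟩ := hG.2 q hqS
      have hlt : e < (q.length : Int) := by omega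
      rw [hxq, pvGet_eq _ e he (by rw [pvMrg_len q e he hlt]; omega), Option.getD_some,
        pvMrg_getD q e he hlt] at hxlt
      omega
  obtain ⟨hxS, hxm⟩ := hx
  obtain ⟨hx12, hxent⟩ := hG.2 x hxS
  have hxlt' : e < (x.length : Int) := by omega
  rw [pvGet_eq x e he hxlt', Option.getD_some] at hxlt
  have hx01 : x.getD e.toNat 0 = 0 ∨ x.getD e.toNat 0 = 1 := by
    rcases pvEnt_getD x e.toNat (by omega) hxent with h | h | h <;> omega
  -- the dual of x is also a plain member of S, contradicting ¬ pvM S e x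
  have hdd : pvDual e x ∈ S := by
    rcases (hchar (pvDual e x)).mp hxd with h | ⟨q, hqS, _, hdq⟩
    · exact h.1
    · exfalso
      obtain ⟨hq12, _⟩ := hG.2 q hqS
      have hltq : e < (q.length : Int) := by omega
      have h2 : (pvDual e x).getD e.toNat 0 = 2 := by rw [hdq, pvMrg_getD q e he hltq]
      rw [pvDual_getD x e he hxlt'] at h2
      rcases pvXor_cases _ hx01 with ⟨_, hb⟩ | ⟨_, hb⟩ <;> rw [hb] at h2 <;> omega
  exact hxm ⟨by rw [pvGet_eq x e he hxlt', Option.getD_some]; omega, hdd⟩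

-- a pass over a pair-free set changes nothing
lemma pvPassA_noop (e : Int) (C : PySem.Set (List Int)) :
    ∀ (L : List (List Int)), (∀ p ∈ L, ¬ pvM C e p) →
      L.foldl (pvStepA e) (C, false) = (C, false) := by
  intro L
  induction L with
  | nil => intro _; simp
  | cons p rest ih =>
    intro h
    have hstep : pvStepA e (C, false) p = (C, false) := by
      unfold pvStepA
      by_cases hc : PySem.Set.contains C p = true
      · simp only [hc, if_true]
        cases hv : PySem.List.pyGet? p e with
        | none => rfl
        | some v =>
          by_cases hv2 : v < 2
          · have hd : PySem.Set.contains C (PySem.List.slice p none (some e) ++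
                [PySem.Int.bxor v 1] ++ PySem.List.slice p (some (e + 1)) none) = false := by
              rw [Bool.eq_false_iff]
              intro hcon
              refine h p List.mem_cons_self ⟨?_, ?_⟩
              · rw [hv]; simpa using hv2
              · have hde : pvDual e p = PySem.List.slice p none (some e) ++
                    [PySem.Int.bxor v 1] ++ PySem.List.slice p (some (e + 1)) none := by
                  simp [pvDual, hv]
                rw [hde]
                exact (PySem.Set.contains_iff C _).mp hcon
            have hd' : PySem.List.slice p none (some e) ++ [PySem.Int.bxor v 1] ++
                PySem.List.slice p (some (e + 1)) none ∉ C := by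
              intro hm
              rw [Bool.eq_false_iff] at hd
              exact hd ((PySem.Set.contains_iff _ _).mpr hm)
            simp [hv2]
            simpa using hd'
          · simp [hv2]
      · have hnotin : p ∉ C := fun hm => hc ((PySem.Set.contains_iff _ _).mpr hm)
        simp [hnotin]
    rw [List.foldl_cons, hstep]
    exact ih (fun q hq => h q (List.mem_cons_of_mem p hq))

-- A's while loop stabilises after one merging pass
lemma pvWhileA_eq (e : Int) (he : 0 ≤ e) (he' : e < 12) (S : List (List Int))
    (hG : pvGood S) :
    pvWhileA e (S.length + 1) S = (S.foldl (pvStepA e) (S, false)).1 := by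
  obtain ⟨hchar, hnd, hch⟩ := pvPassA_char e he he' S hG
  cases hr : (S.foldl (pvStepA e) (S, false)).2 with
  | false =>
    cases hl : S.length with
    | zero => unfold pvWhileA; simp [hr]
    | succ m => unfold pvWhileA; simp [hr]
  | true =>
    obtain ⟨q, hqS, _⟩ := hch.mp hr
    have hpos : 0 < S.length := List.length_pos_of_mem hqS
    obtain ⟨m, hm⟩ : ∃ m, S.length = m + 1 := ⟨S.length - 1, by omega⟩
    rw [hm]
    show pvWhileA e (m + 1 + 1) S = _
    unfold pvWhileA
    simp only [hr, if_true]
    set R := (S.foldl (pvStepA e) (S, false)).1 with hR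
    have hnoop : R.foldl (pvStepA e) (R, false) = (R, false) :=
      pvPassA_noop e R R (pvNoPair_of_char e he he' S R hG hchar)
    unfold pvWhileA
    simp [hnoop]

-- ===== characterisation of B's single pass =====

-- generic: folding `add ∘ g` over a list
lemma pvFoldAdd_char (g : List Int → List Int) :
    ∀ (L : List (List Int)) (acc : PySem.Set (List Int)),
      (∀ x, x ∈ L.foldl (fun nw p => PySem.Set.add nw (g p)) acc ↔
        x ∈ acc ∨ ∃ p ∈ L, x = g p) ∧
      (acc.Nodup → (L.foldl (fun nw p => PySem.Set.add nw (g p)) acc).Nodup) := by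
  intro L
  induction L with
  | nil => intro acc; simp
  | cons p rest ih =>
    intro acc
    simp only [List.foldl_cons]
    obtain ⟨h1, h2⟩ := ih (PySem.Set.add acc (g p))
    constructor
    · intro x
      rw [h1 x, PySem.Set.mem_add]
      constructor
      · rintro ((hx | hx) | ⟨q, hq, hx⟩)
        · exact Or.inl hx
        · exact Or.inr ⟨p, List.mem_cons_self, hx⟩
        · exact Or.inr ⟨q, List.mem_cons_of_mem p hq, hx⟩
      · rintro (hx | ⟨q, hq, hx⟩)
        · exact Or.inl (Or.inl hx)
        · rcases List.mem_cons.mp hq with rfl | hq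
          · exact Or.inl (Or.inr hx)
          · exact Or.inr ⟨q, hq, hx⟩
    · exact fun hnd => h2 (PySem.Set.nodup_add acc (g p) hnd)

lemma pvPassB_go (e : Int) (he : 0 ≤ e) (he' : e < 12) (S : List (List Int))
    (hG : pvGood S) :
    ∀ (L : List (List Int)) (acc : PySem.Set (List Int)), (∀ p ∈ L, p ∈ S) →
      (∀ x, x ∈ L.foldl
        (fun nw p =>
          match PySem.List.pyGet? p e with
          | none => PySem.Set.add nw p
          | some v =>
            if v < 2 then
              if PySem.Set.contains S
                  (PySem.List.slice p none (some e) ++ [PySem.Int.bxor v 1] ++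
                   PySem.List.slice p (some (e + 1)) none) then
                PySem.Set.add nw
                  (PySem.List.slice p none (some e) ++ [2] ++
                   PySem.List.slice p (some (e + 1)) none)
              else PySem.Set.add nw p
            else PySem.Set.add nw p) acc ↔
        x ∈ acc ∨ ∃ p ∈ L, ((pvM S e p ∧ x = pvMrg e p) ∨ (¬ pvM S e p ∧ x = p))) ∧
      (acc.Nodup → (L.foldl (fun nw p =>
          match PySem.List.pyGet? p e with
          | none => PySem.Set.add nw p
          | some v =>
            if v < 2 then
              if PySem.Set.contains S
                  (PySem.List.slice p none (some e) ++ [PySem.Int.bxor v 1] ++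
                   PySem.List.slice p (some (e + 1)) none) then
                PySem.Set.add nw
                  (PySem.List.slice p none (some e) ++ [2] ++
                   PySem.List.slice p (some (e + 1)) none)
              else PySem.Set.add nw p
            else PySem.Set.add nw p) acc).Nodup) := by
  intro L acc hsub
  have hcongr : L.foldl
      (fun nw p =>
        match PySem.List.pyGet? p e with
        | none => PySem.Set.add nw p
        | some v =>
          if v < 2 then
            if PySem.Set.contains S
                (PySem.List.slice p none (some e) ++ [PySem.Int.bxor v 1] ++
                 PySem.List.slice p (some (e + 1)) none) then
              PySem.Set.add nw
                (PySem.List.slice p none (some e) ++ [2] ++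
                 PySem.List.slice p (some (e + 1)) none)
            else PySem.Set.add nw p
          else PySem.Set.add nw p) acc =
      L.foldl (fun nw p => PySem.Set.add nw
        (if ((PySem.List.pyGet? p e).getD 2 < 2 ∧ pvDual e p ∈ S) then pvMrg e p else p)) acc := by
    refine PySem.List.foldl_congr_mem L _ _ acc (fun nw p hp => ?_)
    obtain ⟨hp12, _⟩ := hG.2 p (hsub p hp)
    have hlt : e < (p.length : Int) := by omega
    have hv := pvGet_eq p e he hlt
    have hde : pvDual e p = PySem.List.slice p none (some e) ++
        [PySem.Int.bxor (p.getD e.toNat 0) 1] ++ PySem.List.slice p (some (e + 1)) none := by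
      simp [pvDual, hv]
    rw [hv]
    simp only [Option.getD_some]
    by_cases hv2 : p.getD e.toNat 0 < 2
    · by_cases hdS : pvDual e p ∈ S
      · have hc : PySem.Set.contains S (PySem.List.slice p none (some e) ++
            [PySem.Int.bxor (p.getD e.toNat 0) 1] ++
            PySem.List.slice p (some (e + 1)) none) = true := by
          rw [PySem.Set.contains_iff]
          rw [← hde]
          exact hdS
        rw [if_pos hv2, if_pos hc, if_pos (⟨hv2, hdS⟩ : _ ∧ _)]
        simp [pvMrg]
      · have hc : PySem.Set.contains S (PySem.List.slice p none (some e) ++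
            [PySem.Int.bxor (p.getD e.toNat 0) 1] ++
            PySem.List.slice p (some (e + 1)) none) = false := by
          rw [Bool.eq_false_iff]
          intro hcon
          exact hdS (by rw [hde]; exact (PySem.Set.contains_iff _ _).mp hcon)
        rw [if_pos hv2, if_neg (by rw [hc]; simp : ¬(PySem.Set.contains S
          (PySem.List.slice p none (some e) ++ [PySem.Int.bxor (p.getD e.toNat 0) 1] ++
           PySem.List.slice p (some (e + 1)) none) = true)),
          if_neg (fun h : _ ∧ _ => hdS h.2)]
    · rw [if_neg hv2, if_neg (fun h : _ ∧ _ => hv2 h.1)]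
  rw [hcongr]
  obtain ⟨h1, h2⟩ := pvFoldAdd_char
    (fun p => if ((PySem.List.pyGet? p e).getD 2 < 2 ∧ pvDual e p ∈ S) then pvMrg e p else p)
    L acc
  refine ⟨fun x => ?_, h2⟩
  rw [h1 x]
  constructor
  · rintro (hx | ⟨q, hq, hx⟩)
    · exact Or.inl hx
    · refine Or.inr ⟨q, hq, ?_⟩
      by_cases hm : ((PySem.List.pyGet? q e).getD 2 < 2 ∧ pvDual e q ∈ S)
      · rw [if_pos hm] at hx
        exact Or.inl ⟨hm, hx⟩
      · rw [if_neg hm] at hx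
        exact Or.inr ⟨hm, hx⟩
  · rintro (hx | ⟨q, hq, ⟨hm, hx⟩ | ⟨hm, hx⟩⟩)
    · exact Or.inl hx
    · exact Or.inr ⟨q, hq, by
        rw [if_pos (show ((PySem.List.pyGet? q e).getD 2 < 2 ∧ pvDual e q ∈ S) from hm)]
        exact hx⟩
    · exact Or.inr ⟨q, hq, by
        rw [if_neg (show ¬((PySem.List.pyGet? q e).getD 2 < 2 ∧ pvDual e q ∈ S) from hm)]
        exact hx⟩

lemma pvPassB_char (e : Int) (he : 0 ≤ e) (he' : e < 12) (S : List (List Int))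
    (hG : pvGood S) :
    (∀ x, x ∈ pvPassB e S ↔
       ((x ∈ S ∧ ¬ pvM S e x) ∨ (∃ q ∈ S, pvM S e q ∧ x = pvMrg e q))) ∧
    (pvPassB e S).Nodup := by
  obtain ⟨h1, h2⟩ := pvPassB_go e he he' S hG S PySem.Set.empty (fun _ h => h)
  constructor
  · intro x
    rw [pvPassB, h1 x]
    constructor
    · rintro (h | ⟨p, hp, ⟨hm, hx⟩ | ⟨hm, hx⟩⟩)
      · simp [PySem.Set.empty] at h
      · exact Or.inr ⟨p, hp, hm, hx⟩
      · subst hx; exact Or.inl ⟨hp, hm⟩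
    · rintro (⟨hx, hm⟩ | ⟨q, hq, hm, hx⟩)
      · exact Or.inr ⟨x, hx, Or.inr ⟨hm, rfl⟩⟩
      · exact Or.inr ⟨q, hq, Or.inl ⟨hm, hx⟩⟩
  · exact h2 (by simp [PySem.Set.empty])

-- ===== the twelve-edge folds agree as sets =====

lemma pvEdge_AB (e : Int) (he : 0 ≤ e) (he' : e < 12) (SA SB : List (List Int))
    (hGA : pvGood SA) (hGB : pvGood SB) (hmem : ∀ x, x ∈ SA ↔ x ∈ SB) :
    (∀ x, x ∈ pvWhileA e (SA.length + 1) SA ↔ x ∈ pvPassB e SB) ∧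
    pvGood (pvWhileA e (SA.length + 1) SA) ∧ pvGood (pvPassB e SB) := by
  obtain ⟨hcharA, hndA, _⟩ := pvPassA_char e he he' SA hGA
  obtain ⟨hcharB, hndB⟩ := pvPassB_char e he he' SB hGB
  rw [pvWhileA_eq e he he' SA hGA]
  refine ⟨fun x => ?_, pvGood_of_char e he he' SA _ hGA hcharA hndA,
    pvGood_of_char e he he' SB _ hGB hcharB hndB⟩
  rw [hcharA x, hcharB x]
  constructor
  · rintro (⟨hx, hm⟩ | ⟨q, hq, hm, hx⟩)
    · exact Or.inl ⟨(hmem x).mp hx, fun h => hm ((pvM_congr SA SB e x hmem).mpr h)⟩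
    · exact Or.inr ⟨q, (hmem q).mp hq, (pvM_congr SA SB e q hmem).mp hm, hx⟩
  · rintro (⟨hx, hm⟩ | ⟨q, hq, hm, hx⟩)
    · exact Or.inl ⟨(hmem x).mpr hx, fun h => hm ((pvM_congr SA SB e x hmem).mp h)⟩
    · exact Or.inr ⟨q, (hmem q).mpr hq, (pvM_congr SA SB e q hmem).mpr hm, hx⟩

lemma pvEdges_fold (es : List Int) (hes : ∀ e ∈ es, 0 ≤ e ∧ e < 12) :
    ∀ (SA SB : List (List Int)), pvGood SA → pvGood SB → (∀ x, x ∈ SA ↔ x ∈ SB) →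
      (∀ x, x ∈ es.foldl (fun parts e => pvWhileA e (parts.length + 1) parts) SA ↔
            x ∈ es.foldl (fun ps e => pvPassB e ps) SB) ∧
      pvGood (es.foldl (fun parts e => pvWhileA e (parts.length + 1) parts) SA) ∧
      pvGood (es.foldl (fun ps e => pvPassB e ps) SB) := by
  induction es with
  | nil => intro SA SB hGA hGB hmem; exact ⟨hmem, hGA, hGB⟩
  | cons e rest ih =>
    intro SA SB hGA hGB hmem
    obtain ⟨he, he'⟩ := hes e List.mem_cons_self
    obtain ⟨hmem', hGA', hGB'⟩ := pvEdge_AB e he he' SA SB hGA hGB hmem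
    simp only [List.foldl_cons]
    exact ih (fun f hf => hes f (List.mem_cons_of_mem e hf)) _ _ hGA' hGB' hmem'

-- ===== the initial partition set is pvGood =====

lemma pvBits_len (c : Int) : (pvBits c).length = 12 := by
  rw [pvBits, List.length_map]
  rfl

lemma pvBand01 (y : Int) : PySem.Int.band y 1 = 0 ∨ PySem.Int.band y 1 = 1 := by
  have h2 : PySem.Int.band y 1 = PySem.Int.mod y 2 := PySem.Int.band_one y
  have h0 := PySem.Int.mod_nonneg y (by omega : (0:Int) < 2)
  have h1 := PySem.Int.mod_lt y (by omega : (0:Int) < 2)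
  omega

lemma pvBits_ent (c : Int) : ∀ b ∈ pvBits c, b = 0 ∨ b = 1 ∨ b = 2 := by
  intro b hb
  rw [pvBits] at hb
  obtain ⟨x, _, hbx⟩ := List.mem_map.mp hb
  rw [← hbx]
  rcases pvBand01 (c >>> (x.toNat : Int)) with h | h <;> rw [h] <;> simp

lemma pvGood_init (cases : List Int) : pvGood (PySem.Set.ofList (cases.map pvBits)) := by
  refine ⟨PySem.Set.nodup_ofList _, fun p hp => ?_⟩
  rw [PySem.Set.mem_ofList] at hp
  obtain ⟨c, _, hc⟩ := List.mem_map.mp hp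
  subst hc
  exact ⟨pvBits_len c, pvBits_ent c⟩

-- ===== per weight group, A's pipeline and B's pipeline give the same sorted list =====

set_option maxHeartbeats 2000000 in
lemma pvGroup_eq (cases : List Int) :
    PySem.List.sorted
      ((PySem.List.pyRange 0 12).foldl (fun parts e => pvWhileA e (parts.length + 1) parts)
        (PySem.Set.ofList (cases.map pvBits))) (fun p => p) =
    PySem.List.sorted
      ((PySem.List.pyRange 0 12).foldl (fun ps e => pvPassB e ps)
        (PySem.Set.ofList (cases.map pvBits))) (fun p => p) := by
  have hes : ∀ e ∈ PySem.List.pyRange 0 12, 0 ≤ e ∧ e < 12 := by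
    intro e hf
    rw [PySem.List.mem_pyRange_one] at hf
    omega
  obtain ⟨hmem, hGA, hGB⟩ := pvEdges_fold (PySem.List.pyRange 0 12) hes
    (PySem.Set.ofList (cases.map pvBits)) (PySem.Set.ofList (cases.map pvBits))
    (pvGood_init cases) (pvGood_init cases) (fun _ => Iff.rfl)
  generalize hA : (PySem.List.pyRange 0 12).foldl
      (fun parts e => pvWhileA e (parts.length + 1) parts)
      (PySem.Set.ofList (cases.map pvBits)) = LA at hmem hGA ⊢
  generalize hB : (PySem.List.pyRange 0 12).foldl (fun ps e => pvPassB e ps)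
      (PySem.Set.ofList (cases.map pvBits)) = LB at hmem hGB ⊢
  rw [show (fun (a b : List Int) => a.decidableLT b) =
      @LinearOrder.toDecidableLT (List Int) List.instLinearOrder from
    funext fun _ => funext fun _ => Subsingleton.elim _ _]
  show @PySem.List.sorted (List Int) (List Int) List.instLinearOrder.toLT
      LinearOrder.toDecidableLT LA (fun p => p) false =
    @PySem.List.sorted (List Int) (List Int) List.instLinearOrder.toLT
      LinearOrder.toDecidableLT LB (fun p => p) false
  exact PySem.List.sorted_eq_sorted_of_perm _ _ _ (fun a b h => h)
    ((List.perm_ext_iff_of_nodup hGA.1 hGB.1).mpr hmem)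

-- ===== the two grouping dictionaries are equal =====

lemma pvDict_eq :
    ∀ (xs : List (List Int)) (i : Int) (d : PySem.Dict (List Int) (List Int)),
      (∀ k c, c ∈ PySem.Dict.getD d k [] → c < i) →
      (PySem.List.enumerate xs i).foldl
        (fun d cw => PySem.Dict.modify d cw.2 PySem.Set.empty (fun s => PySem.Set.add s cw.1)) d =
      (PySem.List.enumerate xs i).foldl
        (fun d cw => PySem.Dict.modify d cw.2 [] (fun l => l ++ [cw.1])) d := by
  intro xs
  induction xs with
  | nil => intro i d _; rfl
  | cons w rest ih =>
    intro i d hinv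
    rw [PySem.List.enumerate_cons]
    simp only [List.foldl_cons]
    have hni : i ∉ PySem.Dict.getD d w [] := fun h => absurd (hinv w i h) (lt_irrefl i)
    have hadd : PySem.Set.add (PySem.Dict.getD d w PySem.Set.empty) i =
        PySem.Dict.getD d w [] ++ [i] := by
      simp [PySem.Set.add, PySem.Set.contains, PySem.Set.empty, hni]
    have hstep : PySem.Dict.modify d w PySem.Set.empty (fun s => PySem.Set.add s i) =
        PySem.Dict.modify d w [] (fun l => l ++ [i]) := by
      simp only [PySem.Dict.modify, hadd]
    rw [hstep]
    refine ih (i + 1) _ (fun k c hc => ?_)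
    rw [PySem.Dict.modify] at hc
    rw [PySem.Dict.getD_insert] at hc
    by_cases hk : k = w
    · rw [if_pos hk] at hc
      rcases List.mem_append.mp hc with hc | hc
      · exact lt_trans (hinv w c (by simpa [PySem.Set.empty] using hc)) (by omega)
      · simp at hc; omega
    · rw [if_neg hk] at hc
      exact lt_trans (hinv k c hc) (by omega)

-- ===== VERDICT helper =====

theorem pvMain : ∀ (caseToWeights : List (List Int)),
    analyzeCaseFunction caseToWeights = analyzeCaseFunction_alt caseToWeights := by
  intro cw
  unfold analyzeCaseFunction analyzeCaseFunction_alt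
  rw [pvDict_eq cw 0 PySem.Dict.empty
    (by intro k c hc; simp [PySem.Dict.getD, PySem.Dict.get?, PySem.Dict.empty] at hc)]
  set d := (PySem.List.enumerate cw).foldl
    (fun d cw => PySem.Dict.modify d cw.2 [] (fun l => l ++ [cw.1])) PySem.Dict.empty with hd
  rw [PySem.List.foldl_append_singleton_eq_map
    (f := fun weights => (weights,
      (PySem.List.sorted ((PySem.List.pyRange 0 12).foldl
        (fun parts e => pvWhileA e (parts.length + 1) parts)
        (PySem.Set.ofList ((PySem.Dict.getD d weights PySem.Set.empty).map pvBits))) (fun p => p)).map pvRender)),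
    PySem.List.foldl_append_singleton_eq_map
    (f := fun weights => (weights,
      (PySem.List.sorted ((PySem.List.pyRange 0 12).foldl (fun ps e => pvPassB e ps)
        (PySem.Set.ofList ((PySem.Dict.getD d weights []).map pvBits))) (fun p => p)).map pvRender))]
  simp only [List.nil_append]
  refine List.map_congr_left (fun w _ => ?_)
  have : PySem.Dict.getD d w PySem.Set.empty = PySem.Dict.getD d w [] := rfl
  rw [this, pvGroup_eq]

-- ===== VERDICT (by name: the statement is the Claim_ definition above) =====
theorem analyzeCaseFunction_spec : Claim_equal_analyzeCaseFunction := by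
  intro caseToWeights _
  unfold Spec_analyzeCaseFunction
  exact pvMain caseToWeights
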